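-- pv_equiv track=rewrite | github.com/r2ravi/DNA-Conversion-Project-COGS-18 | functions.py | DNA_to_tRNA_List
-- ===== SOURCE A (Python) =====
-- def DNA_to_mRNA_List(DNA_string):
--     """Takes in DNA sequence string and converts it to an mRNA list.
--
--
--     Parameters
--     ----------
--     DNA_string : string
--         String that contains letters/characters of a DNA string, e.g., 'a,' t,' 'c,' and 'g.'
--
--
--     Returns
--     -------
--     mRNA_List : list
--         List that converts each and every value in input to corresponding mRNA values.
--     """
--
--     # Creates an empty list to which values will be appended
--     mRNA_List = [];
--
--     # Loops through each character of DNA string input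
--     for char in DNA_string:
--
--         if char == 'a' or char == 'A':
--             # Characters are appended to mRNA_List
--             mRNA_List.append('U')
--
--         elif char == 't' or char == 'T':
--             mRNA_List.append('A')
--
--         elif char == 'c' or char == 'C':
--             mRNA_List.append('G')
--
--         elif char == 'g' or char == 'G':
--             mRNA_List.append('C')
--
--     # Output mRNA_List is returned by function
--     return mRNA_List
--
-- def DNA_to_tRNA_List(DNA_string):
--     """Takes in DNA sequence string and converts it to a tRNA list.
--
--
--     Parameters
--     ----------
--     DNA_string : string
--         String that contains letters/characters of a DNA string, e.g., 'a,' t,' 'c,' and 'g.'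
--
--
--     Returns
--     -------
--     tRNAList : string
--         List that converts each and every value in input to corresponding tRNA values.
--     """
--
--     # Previous function, DNA_to_mRNAList() is called on to get mRNA_List for conversion to tRNA
--     mRNA_List = DNA_to_mRNA_List(DNA_string)
--
--     # Creates an empty list to which values will be appended
--     tRNA_List = []
--
--     # Each element of mRNA_List is looped through
--     for char in mRNA_List:
--
--         if char == 'a' or char == 'A':
--             # Characters are appended to tRNA_List
--             tRNA_List.append('U')
--
--         elif char == 'u' or char == 'U':
--             tRNA_List.append('A')
--
--         elif char == 'c' or char == 'C':
--             tRNA_List.append('G')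
--
--         elif char == 'g' or char == 'G':
--             tRNA_List.append('C')
--
--     # Output tRNA_List is returned by function
--     return tRNA_List
-- ===== SOURCE B (Python) =====
-- _TRNA = {'a': 'A', 'A': 'A', 't': 'U', 'T': 'U',
--          'c': 'C', 'C': 'C', 'g': 'G', 'G': 'G'}
--
-- def DNA_to_tRNA_List(DNA_string):
--     return [_TRNA[ch] for ch in DNA_string if ch in _TRNA]
-- ===== Notes on version B (the rewrite author's own statement) =====
-- stated objective: simpler
-- what changed: Replaces the two-stage DNA-to-mRNA-to-tRNA translation (two loops and an intermediate list) with a single pass over the string using the precomposed DNA-to-tRNA lookup table, dropping unmapped characters.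
import Mathlib
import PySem

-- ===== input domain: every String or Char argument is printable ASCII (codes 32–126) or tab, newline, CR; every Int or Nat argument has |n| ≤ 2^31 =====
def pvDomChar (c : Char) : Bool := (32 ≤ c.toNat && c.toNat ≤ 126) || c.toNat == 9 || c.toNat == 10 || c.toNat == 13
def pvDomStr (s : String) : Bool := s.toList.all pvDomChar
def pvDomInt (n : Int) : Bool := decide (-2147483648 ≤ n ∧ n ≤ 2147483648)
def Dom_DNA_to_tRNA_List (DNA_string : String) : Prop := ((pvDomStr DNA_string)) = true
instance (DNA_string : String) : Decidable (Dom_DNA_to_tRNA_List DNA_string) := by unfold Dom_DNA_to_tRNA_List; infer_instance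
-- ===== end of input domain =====

-- B collapses A's two translation passes (DNA to mRNA, then mRNA to tRNA) into a single pass
-- using the precomposed DNA-to-tRNA lookup table (simpler; one loop instead of two).

-- ===== PORT A =====
-- helper DNA_to_mRNA_List: first loop of A (append per branch, accumulator fold)
def DNA_to_mRNA_List (DNA_string : String) : List String :=
  DNA_string.toList.foldl (fun mRNA_List char =>
    if char = 'a' ∨ char = 'A' then mRNA_List ++ ["U"]
    else if char = 't' ∨ char = 'T' then mRNA_List ++ ["A"]
    else if char = 'c' ∨ char = 'C' then mRNA_List ++ ["G"]
    else if char = 'g' ∨ char = 'G' then mRNA_List ++ ["C"]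
    else mRNA_List) []

def DNA_to_tRNA_List (DNA_string : String) : List String :=
  (DNA_to_mRNA_List DNA_string).foldl (fun tRNA_List char =>
    if char = "a" ∨ char = "A" then tRNA_List ++ ["U"]
    else if char = "u" ∨ char = "U" then tRNA_List ++ ["A"]
    else if char = "c" ∨ char = "C" then tRNA_List ++ ["G"]
    else if char = "g" ∨ char = "G" then tRNA_List ++ ["C"]
    else tRNA_List) []

-- ===== PORT B =====
-- the dict _TRNA as an association-list lookup (dict.get, first match)
def pvTRNA : PySem.Dict Char String :=
  PySem.Dict.ofList
    [('a', "A"), ('A', "A"), ('t', "U"), ('T', "U"),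
     ('c', "C"), ('C', "C"), ('g', "G"), ('G', "G")]

-- single comprehension: keep ch if ch in _TRNA, emit _TRNA[ch]
def DNA_to_tRNA_List_alt (DNA_string : String) : List String :=
  DNA_string.toList.filterMap (fun ch => PySem.Dict.get? pvTRNA ch)

-- ===== PRECONDITION & SPEC =====
def Spec_DNA_to_tRNA_List (DNA_string : String) (out : List String) : Prop := out = DNA_to_tRNA_List_alt DNA_string
instance (DNA_string : String) (out : List String) : Decidable (Spec_DNA_to_tRNA_List DNA_string out) := by unfold Spec_DNA_to_tRNA_List; infer_instance

-- ===== CLAIM (what is proved, stated in full; the proofs are below) =====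
def Claim_equal_DNA_to_tRNA_List : Prop := ∀ (DNA_string : String), Dom_DNA_to_tRNA_List DNA_string → Spec_DNA_to_tRNA_List DNA_string (DNA_to_tRNA_List DNA_string)

-- ===== LEMMAS AND PROOFS =====

-- generalized accumulator form of A's first loop
def pvStep1 (acc : List String) (c : Char) : List String :=
  if c = 'a' ∨ c = 'A' then acc ++ ["U"]
  else if c = 't' ∨ c = 'T' then acc ++ ["A"]
  else if c = 'c' ∨ c = 'C' then acc ++ ["G"]
  else if c = 'g' ∨ c = 'G' then acc ++ ["C"]
  else acc

def pvStep2 (acc : List String) (s : String) : List String :=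
  if s = "a" ∨ s = "A" then acc ++ ["U"]
  else if s = "u" ∨ s = "U" then acc ++ ["A"]
  else if s = "c" ∨ s = "C" then acc ++ ["G"]
  else if s = "g" ∨ s = "G" then acc ++ ["C"]
  else acc

theorem pvStep1_acc (acc : List String) (c : Char) :
    pvStep1 acc c = acc ++ pvStep1 [] c := by
  unfold pvStep1; split_ifs <;> simp

theorem pvStep2_acc (acc : List String) (s : String) :
    pvStep2 acc s = acc ++ pvStep2 [] s := by
  unfold pvStep2; split_ifs <;> simp

theorem foldl_step1_acc (l : List Char) (acc : List String) :
    l.foldl pvStep1 acc = acc ++ l.foldl pvStep1 [] := by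
  induction l generalizing acc with
  | nil => simp
  | cons c l ih =>
      simp only [List.foldl_cons]
      rw [ih (pvStep1 acc c), ih (pvStep1 [] c), pvStep1_acc acc c, List.append_assoc]

theorem foldl_step2_acc (l : List String) (acc : List String) :
    l.foldl pvStep2 acc = acc ++ l.foldl pvStep2 [] := by
  induction l generalizing acc with
  | nil => simp
  | cons s l ih =>
      simp only [List.foldl_cons]
      rw [ih (pvStep2 acc s), ih (pvStep2 [] s), pvStep2_acc acc s, List.append_assoc]

theorem foldl_step2_append (l₁ l₂ : List String) (acc : List String) :
    (l₁ ++ l₂).foldl pvStep2 acc = l₂.foldl pvStep2 (l₁.foldl pvStep2 acc) := by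
  simp [List.foldl_append]

-- main per-character correspondence, by induction over the char list
theorem pv_main (l : List Char) :
    (l.foldl pvStep1 []).foldl pvStep2 [] = l.filterMap (fun ch => PySem.Dict.get? pvTRNA ch) := by
  induction l with
  | nil => rfl
  | cons c l ih =>
      simp only [List.foldl_cons, List.filterMap_cons]
      rw [foldl_step1_acc l (pvStep1 [] c), foldl_step2_append,
          foldl_step2_acc (l.foldl pvStep1 []) _, ih]
      by_cases h1 : c = 'a' ∨ c = 'A'
      · rcases h1 with h | h <;> subst h <;> rfl
      · by_cases h2 : c = 't' ∨ c = 'T'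
        · rcases h2 with h | h <;> subst h <;> rfl
        · by_cases h3 : c = 'c' ∨ c = 'C'
          · rcases h3 with h | h <;> subst h <;> rfl
          · by_cases h4 : c = 'g' ∨ c = 'G'
            · rcases h4 with h | h <;> subst h <;> rfl
            · have e1 : pvStep1 [] c = [] := by
                simp [pvStep1, h1, h2, h3, h4]
              have e2 : PySem.Dict.get? pvTRNA c = none := by
                push Not at h1 h2 h3 h4
                have hitems : pvTRNA.items =
                    [('a', "A"), ('A', "A"), ('t', "U"), ('T', "U"),
                     ('c', "C"), ('C', "C"), ('g', "G"), ('G', "G")] := by decide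
                simp only [PySem.Dict.get?, hitems]
                have b1 : ('a' == c) = false := beq_eq_false_iff_ne.mpr (Ne.symm h1.1)
                have b2 : ('A' == c) = false := beq_eq_false_iff_ne.mpr (Ne.symm h1.2)
                have b3 : ('t' == c) = false := beq_eq_false_iff_ne.mpr (Ne.symm h2.1)
                have b4 : ('T' == c) = false := beq_eq_false_iff_ne.mpr (Ne.symm h2.2)
                have b5 : ('c' == c) = false := beq_eq_false_iff_ne.mpr (Ne.symm h3.1)
                have b6 : ('C' == c) = false := beq_eq_false_iff_ne.mpr (Ne.symm h3.2)
                have b7 : ('g' == c) = false := beq_eq_false_iff_ne.mpr (Ne.symm h4.1)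
                have b8 : ('G' == c) = false := beq_eq_false_iff_ne.mpr (Ne.symm h4.2)
                simp [List.find?, b1, b2, b3, b4, b5, b6, b7, b8]
              rw [e1, e2]; rfl

-- ===== VERDICT (by name: the statement is the Claim_ definition above) =====
theorem DNA_to_tRNA_List_spec : Claim_equal_DNA_to_tRNA_List := by
  intro s _
  show DNA_to_tRNA_List s = DNA_to_tRNA_List_alt s
  unfold DNA_to_tRNA_List DNA_to_mRNA_List DNA_to_tRNA_List_alt
  exact pv_main s.toList
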